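-- pv_equiv track=rewrite | github.com/feuras/uih_grav | 04_fisher_disc_rg_scaling.py | build_disc_indices
-- ===== SOURCE A (Python) =====
-- def build_disc_indices(R_max):
--     """
--     Return the coordinates (i,j) of lattice sites lying in a disc of radius R_max
--     on a square grid with spacing 1, centered at (0,0).
--
--     We include integer points (x,y) with x^2 + y^2 <= R_max^2.
--     """
--     coords = []
--     R2 = R_max * R_max
--     # We scan a bounding box [-R_max, R_max] in each direction
--     for x in range(-R_max, R_max + 1):
--         for y in range(-R_max, R_max + 1):
--             if x * x + y * y <= R2:
--                 coords.append((x, y))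
--     return coords
-- ===== SOURCE B (Python) =====
-- import math
--
-- def build_disc_indices(R_max):
--     """
--     Return the coordinates (i,j) of lattice sites lying in a disc of radius R_max
--     on a square grid with spacing 1, centered at (0,0).
--     """
--     R2 = R_max * R_max
--
--     def column(x):
--         ymax = math.isqrt(R2 - x * x)
--         return [(x, y) for y in range(-ymax, ymax + 1)]
--
--     return [p for x in range(-R_max, R_max + 1) for p in column(x)]
-- ===== Notes on version B (the rewrite author's own statement) =====
-- stated objective: alternative
-- what changed: B builds the disc as a flat concatenation of per-column lists, each column's vertical extent computed exactly with math.isqrt(R2 - x*x), instead of scanning the full (2R+1)x(2R+1) bounding box and testing x*x+y*y <= R2 at every point.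
import Mathlib
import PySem

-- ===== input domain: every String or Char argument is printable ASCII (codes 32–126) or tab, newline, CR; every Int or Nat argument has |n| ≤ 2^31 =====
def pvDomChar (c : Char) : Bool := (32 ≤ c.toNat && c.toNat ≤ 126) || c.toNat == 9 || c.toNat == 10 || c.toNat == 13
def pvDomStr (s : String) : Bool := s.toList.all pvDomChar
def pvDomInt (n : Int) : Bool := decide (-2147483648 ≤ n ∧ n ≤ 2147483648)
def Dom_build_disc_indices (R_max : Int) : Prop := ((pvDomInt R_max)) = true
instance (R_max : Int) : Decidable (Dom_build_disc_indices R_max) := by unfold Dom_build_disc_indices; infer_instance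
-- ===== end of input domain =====

-- B builds the disc as a flat concatenation of per-column lists whose exact vertical extent is isqrt(R²-x²), instead of filtering the full bounding box (alternative algorithm, same asymptotic cost).

-- ===== PORT A =====
def build_disc_indices (R_max : Int) : List (Int × Int) :=
  let R2 := R_max * R_max
  (PySem.List.pyRange (-R_max) (R_max + 1) 1).foldl (fun coords x =>
    (PySem.List.pyRange (-R_max) (R_max + 1) 1).foldl (fun coords y =>
      if x * x + y * y ≤ R2 then coords ++ [(x, y)] else coords) coords) []

-- ===== PORT B =====
-- math.isqrt(n) (n ≥ 0 here, since x*x ≤ R2 on every visited column) is ported as Nat.sqrt.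
def pvColumn (R2 x : Int) : List (Int × Int) :=
  let ymax : Int := (Nat.sqrt (R2 - x * x).toNat : Int)
  (PySem.List.pyRange (-ymax) (ymax + 1) 1).map (fun y => (x, y))

def build_disc_indices_alt (R_max : Int) : List (Int × Int) :=
  (PySem.List.pyRange (-R_max) (R_max + 1) 1).flatMap (pvColumn (R_max * R_max))

-- ===== PRECONDITION & SPEC =====
def Spec_build_disc_indices (R_max : Int) (out : List (Int × Int)) : Prop := out = build_disc_indices_alt R_max
instance (R_max : Int) (out : List (Int × Int)) : Decidable (Spec_build_disc_indices R_max out) := by unfold Spec_build_disc_indices; infer_instance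

-- ===== CLAIM (what is proved, stated in full; the proofs are below) =====
def Claim_equal_build_disc_indices : Prop := ∀ (R_max : Int), Dom_build_disc_indices R_max → Spec_build_disc_indices R_max (build_disc_indices R_max)

-- ===== LEMMAS AND PROOFS =====

-- y² ≤ m ↔ |y| ≤ isqrt(m), for 0 ≤ m.
lemma sq_le_iff_natAbs_le_sqrt (m y : Int) (hm : 0 ≤ m) :
    y * y ≤ m ↔ y.natAbs ≤ Nat.sqrt m.toNat := by
  rw [Nat.le_sqrt]
  have h1 : ((y.natAbs * y.natAbs : Nat) : Int) = y * y := Int.natAbs_mul_self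
  omega

-- isqrt(R² - x²) ≤ |R|.
lemma sqrt_col_le (R x : Int) :
    Nat.sqrt (R * R - x * x).toNat ≤ R.natAbs := by
  have h1 : ((R.natAbs * R.natAbs : Nat) : Int) = R * R := Int.natAbs_mul_self
  have h2 : Nat.sqrt (R.natAbs * R.natAbs) = R.natAbs := by
    have h := Nat.sqrt_eq' R.natAbs
    rw [pow_two] at h
    exact h
  have h3 : 0 ≤ x * x := mul_self_nonneg x
  calc Nat.sqrt (R * R - x * x).toNat
      ≤ Nat.sqrt (R.natAbs * R.natAbs) := Nat.sqrt_le_sqrt (by omega)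
    _ = R.natAbs := h2

-- A's filtered bounding-box column equals B's exact isqrt-bounded column.
lemma filter_col (R x : Int) (hx1 : -R ≤ x) (hx2 : x < R + 1) :
    ((PySem.List.pyRange (-R) (R + 1) 1).filter
        (fun y => decide (x * x + y * y ≤ R * R))).map (fun y => (x, y)) =
    pvColumn (R * R) x := by
  unfold pvColumn
  congr 1
  have hR : 0 ≤ R := by omega
  have hm : 0 ≤ R * R - x * x := by nlinarith
  apply List.Perm.eq_of_pairwise (le := (· < ·))
  · intro a b _ _ hab hba; omega
  · exact (PySem.List.pairwise_lt_pyRange_one _ _).filter _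
  · exact PySem.List.pairwise_lt_pyRange_one _ _
  · rw [List.perm_ext_iff_of_nodup
      ((PySem.List.nodup_pyRange_one _ _).filter _) (PySem.List.nodup_pyRange_one _ _)]
    intro y
    simp only [List.mem_filter, PySem.List.mem_pyRange_one, decide_eq_true_eq]
    have h1 := sq_le_iff_natAbs_le_sqrt (R * R - x * x) y hm
    have h2 := sqrt_col_le R x
    omega

-- ===== VERDICT (by name: the statement is the Claim_ definition above) =====
theorem build_disc_indices_spec : Claim_equal_build_disc_indices := by
  intro R _
  unfold Spec_build_disc_indices build_disc_indices build_disc_indices_alt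
  have hA : ∀ (acc : List (Int × Int)) (x : Int), x ∈ PySem.List.pyRange (-R) (R + 1) 1 →
      (PySem.List.pyRange (-R) (R + 1) 1).foldl (fun coords y =>
        if x * x + y * y ≤ R * R then coords ++ [(x, y)] else coords) acc =
      acc ++ pvColumn (R * R) x := by
    intro acc x hx
    rw [PySem.List.mem_pyRange_one] at hx
    rw [PySem.List.foldl_append_ite (fun y => x * x + y * y ≤ R * R) (fun y => (x, y)),
      filter_col R x hx.1 hx.2]
  calc (PySem.List.pyRange (-R) (R + 1) 1).foldl (fun coords x =>
        (PySem.List.pyRange (-R) (R + 1) 1).foldl (fun coords y =>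
          if x * x + y * y ≤ R * R then coords ++ [(x, y)] else coords) coords) []
      = (PySem.List.pyRange (-R) (R + 1) 1).foldl
          (fun coords x => coords ++ pvColumn (R * R) x) [] := by
        apply PySem.List.foldl_congr_mem
        intro acc x hx
        exact hA acc x hx
    _ = (PySem.List.pyRange (-R) (R + 1) 1).flatMap (pvColumn (R * R)) := by
        rw [PySem.List.foldl_append_eq_flatMap]; simp
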